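-- pv_equiv track=rewrite | github.com/DaisyQuest/Transcriberator | modules/worker-transcription/worker_transcription_skeleton.py | _isolate_prominent_pitches
-- ===== SOURCE A (Python) =====
-- def _isolate_prominent_pitches(analysis_frames: tuple[tuple[int, ...], ...]) -> tuple[int, ...]:
--     if not analysis_frames:
--         return ()
--
--     counts: dict[int, int] = {}
--     for frame in analysis_frames:
--         for pitch in frame:
--             counts[pitch] = counts.get(pitch, 0) + 1
--
--     peak = max(counts.values())
--     # Keep only frequent pitches to suppress transient noise.
--     threshold = max(2, peak // 2)
--     isolated = [pitch for pitch, count in counts.items() if count >= threshold]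
--     return tuple(sorted(isolated))
-- ===== SOURCE B (Python) =====
-- def _pitch_runs(flat):
--     """Run-length encode a sorted list: [(value, run length), ...] in ascending value order."""
--     runs = []
--     i = 0
--     while i < len(flat):
--         j = i
--         while j < len(flat) and flat[j] == flat[i]:
--             j += 1
--         runs.append((flat[i], j - i))
--         i = j
--     return runs
--
--
-- def _isolate_prominent_pitches(analysis_frames: tuple[tuple[int, ...], ...]) -> tuple[int, ...]:
--     if not analysis_frames:
--         return ()
--     flat = sorted(pitch for frame in analysis_frames for pitch in frame)
--     runs = _pitch_runs(flat)
--     peak = max(count for _, count in runs)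
--     threshold = max(2, peak // 2)
--     return tuple(pitch for pitch, count in runs if count >= threshold)
-- ===== Notes on version B (the rewrite author's own statement) =====
-- stated objective: alternative
-- what changed: Replaces the dict-based frequency pass plus items-filter-then-sort with sorting the flattened pitch list once and run-length-encoding it, so each distinct pitch and its count come out as a consecutive run already in ascending order and no dictionary or final sort is needed.
import Mathlib
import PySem

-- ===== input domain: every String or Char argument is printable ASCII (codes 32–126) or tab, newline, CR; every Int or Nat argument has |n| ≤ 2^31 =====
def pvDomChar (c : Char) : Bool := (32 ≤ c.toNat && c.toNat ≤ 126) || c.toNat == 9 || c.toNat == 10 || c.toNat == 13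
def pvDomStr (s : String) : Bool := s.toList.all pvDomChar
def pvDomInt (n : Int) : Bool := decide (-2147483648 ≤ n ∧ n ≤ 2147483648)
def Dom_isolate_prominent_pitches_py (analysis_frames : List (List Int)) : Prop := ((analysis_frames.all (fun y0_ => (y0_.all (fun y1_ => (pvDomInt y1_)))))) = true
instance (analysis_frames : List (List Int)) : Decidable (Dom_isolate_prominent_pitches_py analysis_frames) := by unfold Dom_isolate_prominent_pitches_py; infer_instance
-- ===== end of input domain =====

-- B replaces A's dict-based frequency pass (and the final sort of the kept pitches) by sorting the
-- flattened pitch list once and run-length-encoding it, so each distinct pitch with its count is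
-- produced as a consecutive run, already in ascending order — no dictionary, no final sort
-- (objective: simpler).

-- ===== PORT A =====
def isolate_prominent_pitches_py (analysis_frames : List (List Int)) : List Int :=
  if analysis_frames = [] then []
  else
    let counts := analysis_frames.foldl
      (fun counts frame =>
        frame.foldl (fun counts pitch => counts.insert pitch (counts.getD pitch 0 + 1)) counts)
      PySem.Dict.empty
    -- max(counts.values()) raises ValueError when counts is empty; Pre_ excludes that input
    let peak := (PySem.List.max? counts.values (fun v => v)).getD 0
    let threshold := max 2 (PySem.Int.floordiv peak 2)
    let isolated := (counts.items.filter (fun pc => decide (threshold ≤ pc.2))).map (fun pc => pc.1)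
    PySem.List.sorted isolated (fun x => x) false

-- ===== PORT B =====
-- port of Source B's _pitch_runs: the outer while loop is the recursion on the remaining suffix,
-- the inner while loop (scan j forward while flat[j] == flat[i]) is the takeWhile/dropWhile split
def pitchRuns (flat : List Int) : List (Int × Int) :=
  match flat with
  | [] => []
  | x :: t =>
      (x, ((x :: t).takeWhile (fun y => y == x)).length) ::
        pitchRuns ((x :: t).dropWhile (fun y => y == x))
termination_by flat.length
decreasing_by
  simp only [List.dropWhile_cons, beq_self_eq_true, if_true]
  exact Nat.lt_succ_of_le (List.dropWhile_sublist _ |>.length_le)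

def isolate_prominent_pitches_py_alt (analysis_frames : List (List Int)) : List Int :=
  if analysis_frames = [] then []
  else
    let flat := PySem.List.sorted (analysis_frames.flatMap (fun frame => frame)) (fun x => x) false
    let runs := pitchRuns flat
    -- max(...) over the run counts raises ValueError when there are no runs; Pre_ excludes that input
    let peak := (PySem.List.max? (runs.map (fun pc => pc.2)) (fun v => v)).getD 0
    let threshold := max 2 (PySem.Int.floordiv peak 2)
    (runs.filter (fun pc => decide (threshold ≤ pc.2))).map (fun pc => pc.1)

-- ===== PRECONDITION & SPEC =====
-- Pre_ excludes only the inputs where both Pythons raise ValueError (max of an empty sequence):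
-- a nonempty frame tuple all of whose frames are empty.
def Pre_isolate_prominent_pitches_py (analysis_frames : List (List Int)) : Prop :=
  analysis_frames = [] ∨ analysis_frames.flatten ≠ []
instance (analysis_frames : List (List Int)) : Decidable (Pre_isolate_prominent_pitches_py analysis_frames) := by unfold Pre_isolate_prominent_pitches_py; infer_instance

def pvWitness_isolate_prominent_pitches_py : List (List Int) := [[1, 1, 2], [1]]

def Spec_isolate_prominent_pitches_py (analysis_frames : List (List Int)) (out : List Int) : Prop := out = isolate_prominent_pitches_py_alt analysis_frames
instance (analysis_frames : List (List Int)) (out : List Int) : Decidable (Spec_isolate_prominent_pitches_py analysis_frames out) := by unfold Spec_isolate_prominent_pitches_py; infer_instance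

-- ===== CLAIM (what is proved, stated in full; the proofs are below) =====
def Claim_equal_isolate_prominent_pitches_py : Prop := ∀ (analysis_frames : List (List Int)), Dom_isolate_prominent_pitches_py analysis_frames → Pre_isolate_prominent_pitches_py analysis_frames → Spec_isolate_prominent_pitches_py analysis_frames (isolate_prominent_pitches_py analysis_frames)

-- ===== LEMMAS AND PROOFS =====

-- max?, with the identity key, returns the same value on permuted lists.
theorem max?_id_perm {l1 l2 : List Int} (h : l1.Perm l2) :
    PySem.List.max? l1 (fun v => v) = PySem.List.max? l2 (fun v => v) := by
  cases h1 : PySem.List.max? l1 (fun v => v) with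
  | none =>
      rw [PySem.List.max?_eq_none_iff] at h1
      subst h1
      have h2 : l2 = [] := h.symm.eq_nil
      rw [h2, eq_comm, PySem.List.max?_eq_none_iff]
  | some m =>
      cases h2 : PySem.List.max? l2 (fun v => v) with
      | none =>
          rw [PySem.List.max?_eq_none_iff] at h2
          subst h2
          rw [h.eq_nil] at h1
          rw [(PySem.List.max?_eq_none_iff ([] : List Int) (fun v => v)).mpr rfl] at h1
          cases h1
      | some m' =>
          have hm1 := PySem.List.max?_mem h1
          have hm2 := PySem.List.max?_mem h2
          have hle1 := PySem.List.max?_isMax h1 m' (h.mem_iff.mpr hm2)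
          have hle2 := PySem.List.max?_isMax h2 m (h.mem_iff.mp hm1)
          exact congrArg some (le_antisymm hle2 hle1)

-- On a (≤)-sorted list, everything left after dropping the leading run of x is strictly above x.
theorem dropWhile_run_gt {x : Int} {t : List Int}
    (h : (x :: t).Pairwise (fun a b => a ≤ b)) :
    ∀ y ∈ (x :: t).dropWhile (fun y => y == x), x < y := by
  intro y hy
  have hsub : ((x :: t).dropWhile (fun y => y == x)).Sublist (x :: t) :=
    List.dropWhile_sublist (fun y => y == x)
  have hmem : y ∈ x :: t := hsub.mem hy
  have hle : x ≤ y := by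
    rcases List.mem_cons.mp hmem with rfl | hyt
    · exact le_refl y
    · exact (List.pairwise_cons.mp h).1 y hyt
  refine lt_of_le_of_ne hle (fun hxy => ?_)
  subst hxy
  -- now x itself survived the dropWhile; derive a contradiction with the head
  have hd : ((x :: t).dropWhile (fun y => y == x)).Pairwise (fun a b => a ≤ b) := h.sublist hsub
  cases hdw : (x :: t).dropWhile (fun y => y == x) with
  | nil => rw [hdw] at hy; cases hy
  | cons h0 d' =>
      have hhead : (h0 == x) = false := by
        have := List.head?_dropWhile_not (fun y => y == x) (x :: t)
        rw [hdw] at this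
        simpa using this
      have hh0x : h0 ≠ x := by simpa using hhead
      have hxh0 : x ≤ h0 := by
        have hm0 : h0 ∈ x :: t := hsub.mem (hdw ▸ List.mem_cons_self)
        rcases List.mem_cons.mp hm0 with rfl | h0t
        · exact le_refl h0
        · exact (List.pairwise_cons.mp h).1 h0 h0t
      rw [hdw] at hy hd
      rcases List.mem_cons.mp hy with rfl | hyd'
      · exact hh0x rfl
      · exact hh0x (le_antisymm ((List.pairwise_cons.mp hd).1 x hyd') hxh0)

-- Keys of pitchRuns are exactly the members of the list.
theorem pitchRuns_mem (flat : List Int) :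
    ∀ k, k ∈ (pitchRuns flat).map (fun pc => pc.1) ↔ k ∈ flat := by
  induction flat using pitchRuns.induct with
  | case1 => intro k; rw [pitchRuns]; simp
  | case2 x t ih =>
      intro k
      rw [pitchRuns]
      simp only [List.map_cons, List.mem_cons]
      constructor
      · rintro (rfl | hk)
        · exact Or.inl rfl
        · exact List.mem_cons.mp
            ((List.dropWhile_sublist (fun y => y == x)).mem ((ih k).mp hk))
      · intro hk
        by_cases hkx : k = x
        · exact Or.inl hkx
        · refine Or.inr ((ih k).mpr ?_)
          have hmem : k ∈ (x :: t).takeWhile (fun y => y == x) ++ (x :: t).dropWhile (fun y => y == x) := by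
            rw [List.takeWhile_append_dropWhile]
            exact List.mem_cons.mpr hk
          rcases List.mem_append.mp hmem with hw | hd
          · exact absurd (by simpa using List.mem_takeWhile_imp hw) hkx
          · exact hd

-- On a (≤)-sorted list, every run length recorded by pitchRuns is the count of its pitch.
theorem pitchRuns_count (flat : List Int) (h : flat.Pairwise (fun a b => a ≤ b)) :
    ∀ pc ∈ pitchRuns flat, pc.2 = (flat.count pc.1 : Int) := by
  induction flat using pitchRuns.induct with
  | case1 => intro pc hpc; rw [pitchRuns] at hpc; cases hpc
  | case2 x t ih =>
      intro pc hpc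
      have hd : ((x :: t).dropWhile (fun y => y == x)).Pairwise (fun a b => a ≤ b) :=
        h.sublist (List.dropWhile_sublist (fun y => y == x))
      have hgt := dropWhile_run_gt h
      have hsplit : (x :: t).takeWhile (fun y => y == x) ++ (x :: t).dropWhile (fun y => y == x) = x :: t :=
        List.takeWhile_append_dropWhile
      rw [pitchRuns] at hpc
      rcases List.mem_cons.mp hpc with rfl | htail
      · -- the head run: its length is the full count of x
        have h1 : ((x :: t).takeWhile (fun y => y == x)).count x
            = ((x :: t).takeWhile (fun y => y == x)).length := by
          apply List.count_eq_length.mpr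
          intro y hy
          have := List.mem_takeWhile_imp hy
          simp at this
          exact this.symm
        have h2 : ((x :: t).dropWhile (fun y => y == x)).count x = 0 :=
          List.count_eq_zero.mpr (fun hx => absurd (hgt x hx) (lt_irrefl x))
        have hcx : (x :: t).count x = ((x :: t).takeWhile (fun y => y == x)).length := by
          conv_lhs => rw [← hsplit]
          rw [List.count_append, h1, h2, Nat.add_zero]
        simp only []
        rw [hcx]
      · -- a run from the strictly-greater suffix: x does not occur there
        have hkey : pc.1 ∈ (x :: t).dropWhile (fun y => y == x) :=
          (pitchRuns_mem _ pc.1).mp (List.mem_map_of_mem htail)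
        have h0 : ((x :: t).takeWhile (fun y => y == x)).count pc.1 = 0 := by
          apply List.count_eq_zero.mpr
          intro hx
          have heq : pc.1 = x := by simpa using List.mem_takeWhile_imp hx
          exact absurd (heq ▸ hgt pc.1 hkey) (lt_irrefl x)
        have hcnt : (x :: t).count pc.1 = ((x :: t).dropWhile (fun y => y == x)).count pc.1 := by
          conv_lhs => rw [← hsplit]
          rw [List.count_append, h0, Nat.zero_add]
        rw [ih hd pc htail, hcnt]

-- On a (≤)-sorted list the run keys are strictly increasing.
theorem pitchRuns_keys_lt (flat : List Int) (h : flat.Pairwise (fun a b => a ≤ b)) :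
    ((pitchRuns flat).map (fun pc => pc.1)).Pairwise (fun a b => a < b) := by
  induction flat using pitchRuns.induct with
  | case1 => rw [pitchRuns]; simp
  | case2 x t ih =>
      have hd : ((x :: t).dropWhile (fun y => y == x)).Pairwise (fun a b => a ≤ b) :=
        h.sublist (List.dropWhile_sublist (fun y => y == x))
      have hgt := dropWhile_run_gt h
      rw [pitchRuns]
      simp only [List.map_cons]
      refine List.pairwise_cons.mpr ⟨?_, ih hd⟩
      intro k hk
      exact hgt k ((pitchRuns_mem _ k).mp hk)

theorem isolate_prominent_pitches_eq (analysis_frames : List (List Int))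
    (haf : analysis_frames ≠ []) :
    isolate_prominent_pitches_py analysis_frames = isolate_prominent_pitches_py_alt analysis_frames := by
  simp only [isolate_prominent_pitches_py, isolate_prominent_pitches_py_alt, if_neg haf]
  have hflat : analysis_frames.flatMap (fun frame => frame) = analysis_frames.flatten := by
    simp [List.flatMap_def]
  rw [hflat]
  set flat : List Int := analysis_frames.flatten with hflatdef
  set L : List Int := PySem.List.sorted flat (fun x => x) false with hLdef
  have hpermL : L.Perm flat := PySem.List.sorted_perm flat (fun x => x) false
  have hsortL : L.Pairwise (fun a b => a ≤ b) := PySem.List.sorted_pairwise flat (fun x => x)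
  set R : List (Int × Int) := pitchRuns L with hRdef
  set K : List Int := R.map (fun pc => pc.1) with hKdef
  -- run counts are counts in flat
  have hcount : ∀ pc ∈ R, pc.2 = (flat.count pc.1 : Int) := by
    intro pc hpc
    rw [pitchRuns_count L hsortL pc hpc, hpermL.count_eq]
  have hKlt : K.Pairwise (fun a b => a < b) := pitchRuns_keys_lt L hsortL
  have hKnd : K.Nodup := hKlt.imp ne_of_lt
  -- A's counting loop is the counter of the flattened list
  have hcounts : analysis_frames.foldl
      (fun counts frame =>
        frame.foldl (fun counts pitch => counts.insert pitch (counts.getD pitch 0 + 1)) counts)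
      PySem.Dict.empty = PySem.Dict.counter flat := by
    rw [← List.foldl_flatten, PySem.Dict.foldl_insert_getD_add_one_eq_counter]
  rw [hcounts]
  set S : List Int := PySem.Set.ofList flat with hSdef
  have hitems : (PySem.Dict.counter flat).items
      = S.map (fun k => (k, (flat.count k : Int))) := PySem.Dict.items_counter flat
  have hSnd : S.Nodup := PySem.Set.nodup_ofList flat
  -- the run keys are a permutation of the distinct-pitch set
  have hKS : K.Perm S := by
    rw [List.perm_ext_iff_of_nodup hKnd hSnd]
    intro k
    rw [hKdef, pitchRuns_mem L k, hpermL.mem_iff, hSdef, PySem.Set.mem_ofList]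
  -- the two peak computations see permuted value lists
  have hvals : (PySem.Dict.counter flat).values = S.map (fun k => (flat.count k : Int)) := by
    show ((PySem.Dict.counter flat).items).map Prod.snd = _
    rw [hitems, List.map_map]
    rfl
  have hRsnd : R.map (fun pc => pc.2) = K.map (fun k => (flat.count k : Int)) := by
    rw [hKdef, List.map_map]
    exact List.map_congr_left hcount
  have hpeak : PySem.List.max? (PySem.Dict.counter flat).values (fun v => v)
      = PySem.List.max? (R.map (fun pc => pc.2)) (fun v => v) := by
    rw [hvals, hRsnd]
    exact max?_id_perm (hKS.map _).symm
  rw [hpeak]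
  set threshold : Int :=
    max 2 (PySem.Int.floordiv ((PySem.List.max? (R.map (fun pc => pc.2)) (fun v => v)).getD 0) 2)
    with hthr
  -- A's isolated list is the filtered distinct-pitch set
  have hiso : ((PySem.Dict.counter flat).items.filter (fun pc => decide (threshold ≤ pc.2))).map (fun pc => pc.1)
      = S.filter (fun k => decide (threshold ≤ (flat.count k : Int))) := by
    rw [hitems, List.filter_map, List.map_map]
    simp [Function.comp_def]
  rw [hiso]
  -- B's filtered runs are the same filter over the run keys
  have hBout : (R.filter (fun pc => decide (threshold ≤ pc.2))).map (fun pc => pc.1)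
      = K.filter (fun k => decide (threshold ≤ (flat.count k : Int))) := by
    have h1 : R.filter (fun pc => decide (threshold ≤ pc.2))
        = R.filter (fun pc => decide (threshold ≤ (flat.count pc.1 : Int))) := by
      apply List.filter_congr
      intro pc hpc
      rw [hcount pc hpc]
    rw [h1, hKdef, List.filter_map]
    rfl
  rw [hBout]
  -- sorting the filtered set = filtering the strictly-increasing run keys
  exact PySem.List.sorted_eq_of_perm_of_pairwise_lt _ _ (fun x => x)
    (hKS.filter _) (hKlt.filter _)

-- ===== VERDICT (by name: the statement is the Claim_ definition above) =====
theorem isolate_prominent_pitches_py_spec : Claim_equal_isolate_prominent_pitches_py := by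
  intro analysis_frames _ _
  unfold Spec_isolate_prominent_pitches_py
  by_cases haf : analysis_frames = []
  · simp [haf, isolate_prominent_pitches_py, isolate_prominent_pitches_py_alt]
  · exact isolate_prominent_pitches_eq analysis_frames haf
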